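-- pv_equiv track=rewrite | github.com/kkojae91/algorithm_prac | python_algorithm/programmers/모의고사.py | solution
-- ===== SOURCE A (Python) =====
-- def solution(answers):
--     one = [1, 2, 3, 4, 5]
--     two = [2, 1, 2, 3, 2, 4, 2, 5]
--     three = [3, 3, 1, 1, 2, 2, 4, 4, 5, 5]
-- #     answers의 길이보다 one two three의 길이를 길게 만들어 준다.
--     if len(one) < len(answers):
--         one = one*(len(answers) // 2 +1)
--     if len(two) < len(answers):
--         two = two*(len(answers) // 2 +1)
--     if len(three) < len(answers):
--         three = three*(len(answers) // 2 +1)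
--
--     count_list = [0, 0, 0]
--
--     for idx in range(len(answers)):
--         if one[idx] == answers[idx]:
--             count_list[0] += 1
--         if two[idx] == answers[idx]:
--             count_list[1] += 1
--         if three[idx] == answers[idx]:
--             count_list[2] += 1
--
--     answer = []
--     max_num = 0
--     for idx in range(len(count_list)):
--         if max_num > count_list[idx] :
--             pass
--         elif max_num < count_list[idx]:
--             max_num = count_list[idx]
--             answer = [idx+1]
--         else:
--             answer.append(idx+1)
--
--     return answer
-- ===== SOURCE B (Python) =====
-- def solution(answers):
--     patterns = [[1, 2, 3, 4, 5],
--                 [2, 1, 2, 3, 2, 4, 2, 5],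
--                 [3, 3, 1, 1, 2, 2, 4, 4, 5, 5]]
--     # One pass: histogram of (position mod 40, answer); 40 = lcm of the cycle lengths.
--     freq = {}
--     for i, a in enumerate(answers):
--         key = (i % 40, a)
--         freq[key] = freq.get(key, 0) + 1
--     # Each score is 40 histogram lookups -- no rescan of answers per pattern.
--     scores = [sum(freq.get((r, p[r % len(p)]), 0) for r in range(40))
--               for p in patterns]
--     best = max(scores)
--     return [k + 1 for k, s in enumerate(scores) if s == best]
-- ===== Notes on version B (the rewrite author's own statement) =====
-- stated objective: alternative
-- what changed: Instead of replicating the three patterns and comparing all three against each answer per index, B makes one pass building a histogram of (index mod 40, answer) pairs (40 = lcm of the cycle lengths) and then computes each supervisor's score as 40 dictionary lookups into that histogram, selecting winners with max()-then-filter.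
import Mathlib
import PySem

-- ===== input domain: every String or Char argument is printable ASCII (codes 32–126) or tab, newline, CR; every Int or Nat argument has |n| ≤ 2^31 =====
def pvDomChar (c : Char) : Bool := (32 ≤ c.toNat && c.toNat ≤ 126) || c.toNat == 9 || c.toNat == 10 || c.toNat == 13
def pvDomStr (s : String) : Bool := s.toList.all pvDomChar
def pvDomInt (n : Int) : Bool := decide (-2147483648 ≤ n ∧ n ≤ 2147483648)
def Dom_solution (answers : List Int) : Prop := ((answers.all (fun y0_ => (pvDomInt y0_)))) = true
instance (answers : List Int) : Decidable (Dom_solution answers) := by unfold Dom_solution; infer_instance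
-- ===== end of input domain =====

-- B replaces A's pattern replication + fused three-comparison loop by one histogram pass over
-- (index mod 40, answer) pairs plus 40 dictionary lookups per pattern (objective: alternative).

-- ===== PORT A =====
-- body of A's counting loop ('if one[idx]==answers[idx]: count_list[0]+=1' etc.), kept step for step
def countStep (one two three answers : List Int) (c : Int × Int × Int) (idx : Int) : Int × Int × Int :=
  let c := if PySem.List.pyGetD one idx 0 = PySem.List.pyGetD answers idx 0 then (c.1 + 1, c.2.1, c.2.2) else c
  let c := if PySem.List.pyGetD two idx 0 = PySem.List.pyGetD answers idx 0 then (c.1, c.2.1 + 1, c.2.2) else c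
  if PySem.List.pyGetD three idx 0 = PySem.List.pyGetD answers idx 0 then (c.1, c.2.1, c.2.2 + 1) else c

-- body of A's selection loop (running max with tie-append), kept step for step
def selStep (cs : List Int) (s : List Int × Int) (idx : Int) : List Int × Int :=
  let cv := PySem.List.pyGetD cs idx 0
  if s.2 > cv then s
  else if s.2 < cv then ([idx + 1], cv)
  else (s.1 ++ [idx + 1], s.2)

def solution (answers : List Int) : List Int :=
  let one : List Int := [1, 2, 3, 4, 5]
  let two : List Int := [2, 1, 2, 3, 2, 4, 2, 5]
  let three : List Int := [3, 3, 1, 1, 2, 2, 4, 4, 5, 5]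
  let n : Int := answers.length
  let one := if (one.length : Int) < n then PySem.List.pyRepeat one (PySem.Int.floordiv n 2 + 1) else one
  let two := if (two.length : Int) < n then PySem.List.pyRepeat two (PySem.Int.floordiv n 2 + 1) else two
  let three := if (three.length : Int) < n then PySem.List.pyRepeat three (PySem.Int.floordiv n 2 + 1) else three
  let counts := (PySem.List.pyRange 0 n 1).foldl (countStep one two three answers) ((0, 0, 0) : Int × Int × Int)
  let countList : List Int := [counts.1, counts.2.1, counts.2.2]
  ((PySem.List.pyRange 0 3 1).foldl (selStep countList) (([], 0) : List Int × Int)).1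

-- ===== PORT B =====
-- B's histogram key for an enumerated answer: (i % 40, a)
def bKey (ia : Int × Int) : Int × Int := (PySem.Int.mod ia.1 40, ia.2)

-- B's per-pattern score: sum(freq.get((r, p[r % len(p)]), 0) for r in range(40))
def bScore (freq : PySem.Dict (Int × Int) Int) (p : List Int) : Int :=
  ((PySem.List.pyRange 0 40 1).map
    (fun r => freq.getD (r, PySem.List.pyGetD p (PySem.Int.mod r (p.length : Int)) 0) 0)).sum

def solution_alt (answers : List Int) : List Int :=
  let patterns : List (List Int) := [[1, 2, 3, 4, 5], [2, 1, 2, 3, 2, 4, 2, 5], [3, 3, 1, 1, 2, 2, 4, 4, 5, 5]]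
  -- for i, a in enumerate(answers): freq[key] = freq.get(key, 0) + 1
  let freq := (PySem.List.enumerate answers).foldl
    (fun d ia => d.insert (bKey ia) (d.getD (bKey ia) 0 + 1))
    (PySem.Dict.empty : PySem.Dict (Int × Int) Int)
  let scores := patterns.map (bScore freq)
  let best := (PySem.List.max? scores (fun x => x)).getD 0
  ((PySem.List.enumerate scores).filter (fun is => is.2 == best)).map (fun is => is.1 + 1)

-- ===== PRECONDITION & SPEC =====
def Spec_solution (answers : List Int) (out : List Int) : Prop := out = solution_alt answers
instance (answers : List Int) (out : List Int) : Decidable (Spec_solution answers out) := by unfold Spec_solution; infer_instance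

-- ===== CLAIM (what is proved, stated in full; the proofs are below) =====
def Claim_equal_solution : Prop := ∀ (answers : List Int), Dom_solution answers → Spec_solution answers (solution answers)

-- ===== LEMMAS AND PROOFS =====

-- indicator count used to connect A's fused loop with B's histogram sums
def pyScore (p : List Int) (answers : List Int) : Int :=
  ((PySem.List.enumerate answers).map
    (fun ia => if PySem.List.pyGetD p (PySem.Int.mod ia.1 (p.length : Int)) 0 = ia.2 then (1 : Int) else 0)).sum

-- q behaves like p repeated cyclically on indices below n
def CycLike (p q : List Int) (n : Int) : Prop :=
  ∀ j : Int, 0 ≤ j → j < n → PySem.List.pyGetD q j 0 = PySem.List.pyGetD p (PySem.Int.mod j (p.length : Int)) 0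

theorem getD_flatten_replicate (p : List Int) (m i : Nat) (_hp : 0 < p.length)
    (h : i < p.length * m) : ((List.replicate m p).flatten).getD i 0 = p.getD (i % p.length) 0 := by
  induction m generalizing i with
  | zero => simp at h
  | succ m ih =>
    simp only [List.replicate_succ, List.flatten_cons]
    by_cases hi : i < p.length
    · rw [List.getD_append p _ 0 i hi, Nat.mod_eq_of_lt hi]
    · have hmul : p.length * (m + 1) = p.length * m + p.length := by ring
      rw [List.getD_append_right p _ 0 i (by omega)]
      rw [ih (i - p.length) (by omega)]
      conv_rhs => rw [Nat.mod_eq_sub_mod (Nat.le_of_not_lt hi)]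

theorem fmod_pos_eq (a b : Int) (_h0 : 0 ≤ a) (hb : 0 < b) : a.fmod b = a % b := by
  rw [Int.fmod_eq_emod]; simp [hb.le]

theorem cyclike_self (p : List Int) (_hp : 0 < p.length) (n : Int) (hn : n ≤ (p.length : Int)) :
    CycLike p p n := by
  intro j hj0 hjn
  congr 1
  rw [PySem.Int.mod, fmod_pos_eq j _ hj0 (by positivity), Int.emod_eq_of_lt hj0 (by omega)]

theorem cyclike_repeat (p : List Int) (hp : 0 < p.length) (n k : Int)
    (hk : n ≤ (p.length : Int) * k) (hn : 0 < n) : CycLike p (PySem.List.pyRepeat p k) n := by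
  intro j hj0 hjn
  have hpL : (0 : Int) < (p.length : Int) := by exact_mod_cast hp
  have hkpos : 0 < k := by
    by_contra hkle
    rw [not_lt] at hkle
    nlinarith [mul_nonpos_of_nonneg_of_nonpos hpL.le hkle]
  have hkc : ((k.toNat : Int)) = k := Int.toNat_of_nonneg hkpos.le
  have hjc : ((j.toNat : Int)) = j := Int.toNat_of_nonneg hj0
  have hcast : ((p.length * k.toNat : Nat) : Int) = (p.length : Int) * k := by push_cast; rw [hkc]
  have hjlt : j.toNat < p.length * k.toNat := by
    rw [← Nat.cast_lt (α := Int), hcast, hjc]; exact lt_of_lt_of_le hjn hk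
  have hlen : ((PySem.List.pyRepeat p k).length : Int) = ((p.length * k.toNat : Nat) : Int) := by
    simp [PySem.List.pyRepeat, List.length_flatten]
    ring
  rw [PySem.List.pyGetD_eq_getElem _ _ hj0
    (by rw [hlen, hcast]; exact lt_of_lt_of_le hjn hk)]
  have hmod : PySem.Int.mod j (p.length : Int) = ((j.toNat % p.length : Nat) : Int) := by
    rw [PySem.Int.mod, fmod_pos_eq j _ hj0 hpL, Int.natCast_mod, hjc]
  rw [hmod, PySem.List.pyGetD_natCast]
  simp only [PySem.List.pyRepeat]
  rw [List.getElem_eq_getD]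
  exact getD_flatten_replicate p k.toNat j.toNat hp hjlt

-- A's scalar counting loop equals the indicator count, given cyclic-likeness of the indexed list
theorem count_eq_score (p q answers : List Int) (hcy : CycLike p q (answers.length : Int)) :
    (PySem.List.pyRange 0 (answers.length : Int) 1).foldl
      (fun acc idx => if PySem.List.pyGetD q idx 0 = PySem.List.pyGetD answers idx 0 then acc + 1 else acc) 0
      = pyScore p answers := by
  have hbody : (fun (acc : Int) idx => if PySem.List.pyGetD q idx 0 = PySem.List.pyGetD answers idx 0 then acc + 1 else acc)
      = fun acc idx => acc + (if PySem.List.pyGetD q idx 0 = PySem.List.pyGetD answers idx 0 then 1 else 0) := by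
    funext acc idx; split_ifs <;> simp
  rw [hbody, PySem.List.foldl_add]
  rw [pyScore, PySem.List.enumerate_eq_map_pyRange answers 0, List.map_map]
  simp only [PySem.List.len, zero_add]
  apply congrArg
  apply List.map_congr_left
  intro j hj
  rw [PySem.List.mem_pyRange_one] at hj
  simp only [Function.comp]
  rw [hcy j hj.1 hj.2]

theorem score_nonneg (p answers : List Int) : 0 ≤ pyScore p answers := by
  apply List.sum_nonneg
  intro x hx
  simp only [List.mem_map] at hx
  obtain ⟨ia, _, rfl⟩ := hx
  split_ifs <;> norm_num

theorem cyclike_if (p : List Int) (hp : 2 ≤ p.length) (n : Int) (hn : 0 ≤ n) :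
    CycLike p (if (p.length : Int) < n then PySem.List.pyRepeat p (PySem.Int.floordiv n 2 + 1) else p) n := by
  have hp0 : 0 < p.length := by omega
  split_ifs with h
  · apply cyclike_repeat p hp0 n _ ?_ (by omega)
    have hf : PySem.Int.floordiv n 2 = n / 2 := by
      rw [PySem.Int.floordiv, Int.fdiv_eq_ediv_of_nonneg]; omega
    rw [hf]
    have h2 : (2 : Int) * (n / 2 + 1) ≤ (p.length : Int) * (n / 2 + 1) := by
      apply mul_le_mul_of_nonneg_right (by exact_mod_cast hp) (by omega)
    omega
  · exact cyclike_self p hp0 n (by omega)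

theorem countStep_split (q1 q2 q3 answers : List Int) :
    countStep q1 q2 q3 answers = fun (c : Int × Int × Int) idx =>
      ((fun (x : Int) i => if PySem.List.pyGetD q1 i 0 = PySem.List.pyGetD answers i 0 then x + 1 else x) c.1 idx,
       (fun (y : Int × Int) i =>
          ((if PySem.List.pyGetD q2 i 0 = PySem.List.pyGetD answers i 0 then y.1 + 1 else y.1),
           (if PySem.List.pyGetD q3 i 0 = PySem.List.pyGetD answers i 0 then y.2 + 1 else y.2))) c.2 idx) := by
  funext c idx
  simp only [countStep]
  split_ifs <;> rfl

theorem counts_fold (q1 q2 q3 answers : List Int) (n : Int) :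
    (PySem.List.pyRange 0 n 1).foldl (countStep q1 q2 q3 answers) ((0, 0, 0) : Int × Int × Int)
    = ((PySem.List.pyRange 0 n 1).foldl (fun acc idx => if PySem.List.pyGetD q1 idx 0 = PySem.List.pyGetD answers idx 0 then acc + 1 else acc) 0,
       (PySem.List.pyRange 0 n 1).foldl (fun acc idx => if PySem.List.pyGetD q2 idx 0 = PySem.List.pyGetD answers idx 0 then acc + 1 else acc) 0,
       (PySem.List.pyRange 0 n 1).foldl (fun acc idx => if PySem.List.pyGetD q3 idx 0 = PySem.List.pyGetD answers idx 0 then acc + 1 else acc) 0) := by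
  rw [countStep_split]
  rw [PySem.List.foldl_prod_mk
    (fun (x : Int) i => if PySem.List.pyGetD q1 i 0 = PySem.List.pyGetD answers i 0 then x + 1 else x)
    (fun (y : Int × Int) i =>
      ((if PySem.List.pyGetD q2 i 0 = PySem.List.pyGetD answers i 0 then y.1 + 1 else y.1),
       (if PySem.List.pyGetD q3 i 0 = PySem.List.pyGetD answers i 0 then y.2 + 1 else y.2)))]
  rw [PySem.List.foldl_prod_mk
    (fun (x : Int) i => if PySem.List.pyGetD q2 i 0 = PySem.List.pyGetD answers i 0 then x + 1 else x)
    (fun (x : Int) i => if PySem.List.pyGetD q3 i 0 = PySem.List.pyGetD answers i 0 then x + 1 else x)]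

-- ---- B side: the histogram lookup is a count, and the 40 lookups sum to pyScore ----

-- freq's lookup counts the key among the mapped enumeration
theorem getD_freq (answers : List Int) (k : Int × Int) :
    ((PySem.List.enumerate answers).foldl
      (fun d ia => d.insert (bKey ia) (d.getD (bKey ia) 0 + 1))
      (PySem.Dict.empty : PySem.Dict (Int × Int) Int)).getD k 0
    = (((PySem.List.enumerate answers).map bKey).count k : Int) := by
  have h := List.foldl_map (l := PySem.List.enumerate answers) (f := bKey)
    (g := fun (d : PySem.Dict (Int × Int) Int) x => d.insert x (d.getD x 0 + 1))
    (init := (PySem.Dict.empty : PySem.Dict (Int × Int) Int))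
  rw [← h, PySem.Dict.getD_foldl_insert_add_one]
  simp [PySem.Dict.empty, PySem.Dict.getD, PySem.Dict.get?]

-- a singleton indicator: sum over a nodup list containing x.1
theorem sum_ind_not_mem (g : Int → Int) (x : Int × Int) (R : List Int) (hx : x.1 ∉ R) :
    (R.map (fun r => if x == (r, g r) then (1 : Int) else 0)).sum = 0 := by
  induction R with
  | nil => simp
  | cons r R ih =>
    simp only [List.map_cons, List.sum_cons]
    have hne : x ≠ (r, g r) := fun h => hx (by rw [h]; exact List.mem_cons_self)
    rw [if_neg (by simp only [beq_iff_eq]; exact hne),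
        ih (fun h => hx (List.mem_cons_of_mem r h))]
    simp

theorem sum_ind_mem (g : Int → Int) (x : Int × Int) (R : List Int) (hR : R.Nodup) (hx : x.1 ∈ R) :
    (R.map (fun r => if x == (r, g r) then (1 : Int) else 0)).sum
      = if x.2 == g x.1 then (1 : Int) else 0 := by
  induction R with
  | nil => simp at hx
  | cons r R ih =>
    simp only [List.map_cons, List.sum_cons]
    by_cases h : r = x.1
    · subst h
      rw [List.nodup_cons] at hR
      rw [sum_ind_not_mem g x R hR.1, add_zero]
      obtain ⟨a, b⟩ := x
      by_cases hb : b = g a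
      · rw [if_pos (by simp [hb]), if_pos (by simpa using hb)]
      · rw [if_neg (by simp only [beq_iff_eq, Prod.mk.injEq]; tauto),
            if_neg (by simpa using hb)]
    · have hne : x ≠ (r, g r) := fun hh => h (by rw [hh])
      rw [if_neg (by simp only [beq_iff_eq]; exact hne), zero_add]
      exact ih (List.nodup_cons.mp hR).2
        (by rcases List.mem_cons.mp hx with h' | h' <;> [exact absurd h'.symm h; exact h'])

-- partition: summing counts of (r, g r) over nodup R covering all first components
theorem sum_count_partition (g : Int → Int) (ks : List (Int × Int)) (R : List Int)
    (hR : R.Nodup) (hmem : ∀ x ∈ ks, x.1 ∈ R) :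
    (R.map (fun r => (ks.count (r, g r) : Int))).sum
      = ((ks.map (fun x => if x.2 == g x.1 then (1 : Int) else 0)).sum) := by
  induction ks with
  | nil => simp
  | cons x ks ih =>
    have hsplit : (fun r => (((x :: ks).count (r, g r) : Nat) : Int))
        = fun r => (ks.count (r, g r) : Int) + (if x == (r, g r) then (1 : Int) else 0) := by
      funext r
      rw [List.count_cons]
      split_ifs with h <;> simp
    simp only [hsplit]
    rw [PySem.List.sum_map_add_int]
    rw [ih (fun y hy => hmem y (List.mem_cons_of_mem x hy))]
    rw [sum_ind_mem g x R hR (hmem x (List.mem_cons_self))]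
    simp only [List.map_cons, List.sum_cons]
    ring

-- modulus collapse: (i % 40) % len p = i % len p for the three pattern lengths
theorem mod_forty_collapse (L i : Int) (hL : L ∣ 40) (hLpos : 0 < L) (hi : 0 ≤ i) :
    PySem.Int.mod (PySem.Int.mod i 40) L = PySem.Int.mod i L := by
  have h40 : (0 : Int) < 40 := by norm_num
  rw [PySem.Int.mod, PySem.Int.mod, PySem.Int.mod]
  rw [fmod_pos_eq i 40 hi h40]
  rw [fmod_pos_eq _ L (Int.emod_nonneg i (by norm_num)) hLpos]
  rw [fmod_pos_eq i L hi hLpos]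
  exact Int.emod_emod_of_dvd i hL

-- B's 40 lookups sum to the indicator count pyScore
theorem bScore_eq_pyScore (answers p : List Int) (hL : ((p.length : Int)) ∣ 40) (hp : 0 < p.length) :
    bScore ((PySem.List.enumerate answers).foldl
      (fun d ia => d.insert (bKey ia) (d.getD (bKey ia) 0 + 1))
      (PySem.Dict.empty : PySem.Dict (Int × Int) Int)) p = pyScore p answers := by
  have hpL : (0 : Int) < (p.length : Int) := by exact_mod_cast hp
  rw [bScore]
  have hlook : ((PySem.List.pyRange 0 40 1).map
      (fun r => ((PySem.List.enumerate answers).foldl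
        (fun d ia => d.insert (bKey ia) (d.getD (bKey ia) 0 + 1))
        (PySem.Dict.empty : PySem.Dict (Int × Int) Int)).getD
          (r, PySem.List.pyGetD p (PySem.Int.mod r (p.length : Int)) 0) 0))
      = (PySem.List.pyRange 0 40 1).map
        (fun r => ((((PySem.List.enumerate answers).map bKey).count
          (r, PySem.List.pyGetD p (PySem.Int.mod r (p.length : Int)) 0) : Nat) : Int)) := by
    apply List.map_congr_left
    intro r _
    exact getD_freq answers _
  rw [hlook]
  rw [sum_count_partition (fun r => PySem.List.pyGetD p (PySem.Int.mod r (p.length : Int)) 0)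
    _ _ (PySem.List.nodup_pyRange_one 0 40) ?side]
  case side =>
    intro x hx
    simp only [List.mem_map] at hx
    obtain ⟨ia, _, rfl⟩ := hx
    rw [PySem.List.mem_pyRange_one, bKey]
    exact ⟨PySem.Int.mod_nonneg _ (by norm_num), PySem.Int.mod_lt _ (by norm_num)⟩
  simp only [pyScore, List.map_map]
  apply congrArg
  apply List.map_congr_left
  intro ia hia
  have hia0 : 0 ≤ ia.1 := by
    rw [PySem.List.mem_enumerate_iff] at hia
    obtain ⟨k, hk, rfl⟩ := hia
    simp
  simp only [Function.comp, bKey]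
  simp only [mod_forty_collapse (p.length : Int) ia.1 hL hpL hia0]
  by_cases h : PySem.List.pyGetD p (PySem.Int.mod ia.1 (p.length : Int)) 0 = ia.2
  · rw [if_pos (by simp [h]), if_pos h]
  · rw [if_neg (by simp only [beq_iff_eq]; exact fun hh => h hh.symm), if_neg h]

theorem select_eq (c0 c1 c2 : Int) (h0 : 0 ≤ c0) (_h1 : 0 ≤ c1) (_h2 : 0 ≤ c2) :
    ((PySem.List.pyRange 0 3 1).foldl (selStep [c0, c1, c2]) (([], 0) : List Int × Int)).1
      = ((PySem.List.enumerate [c0, c1, c2]).filter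
          (fun is => is.2 == (PySem.List.max? [c0, c1, c2] (fun x => x)).getD 0)).map (fun is => is.1 + 1) := by
  have hr : PySem.List.pyRange 0 3 1 = [0, 1, 2] := by decide
  have he : PySem.List.enumerate [c0, c1, c2] = [(0, c0), (1, c1), (2, c2)] := rfl
  have g0 : PySem.List.pyGetD [c0, c1, c2] 0 0 = c0 := rfl
  have g1 : PySem.List.pyGetD [c0, c1, c2] 1 0 = c1 := rfl
  have g2 : PySem.List.pyGetD [c0, c1, c2] 2 0 = c2 := rfl
  rw [hr, he, PySem.List.max?_id_cons]
  simp only [List.foldl_cons, List.foldl_nil, Option.getD_some]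
  have e0 : selStep [c0, c1, c2] ([], 0) 0 = ([1], c0) := by
    rcases eq_or_lt_of_le h0 with h | h
    · simp only [selStep, g0]; rw [if_neg (by omega), if_neg (by omega)]; simp [← h]
    · simp only [selStep, g0]; rw [if_neg (by omega), if_pos h]; norm_num
  rw [e0]
  rcases lt_trichotomy c0 c1 with h01 | h01 | h01
  · have e1 : selStep [c0, c1, c2] ([1], c0) 1 = ([2], c1) := by
      simp only [selStep, g1]; rw [if_neg (by omega), if_pos h01]; norm_num
    rw [e1]
    rcases lt_trichotomy c1 c2 with h12 | h12 | h12
    · have e2 : selStep [c0, c1, c2] ([2], c1) 2 = ([3], c2) := by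
        simp only [selStep, g2]; rw [if_neg (by omega), if_pos h12]; norm_num
      have hbest : max (max c0 c1) c2 = c2 := by simp only [max_def]; split_ifs <;> omega
      rw [e2, hbest]
      norm_num [List.filter_cons, beq_iff_eq, show c0 ≠ c2 by omega, show c1 ≠ c2 by omega]
    · have e2 : selStep [c0, c1, c2] ([2], c1) 2 = ([2, 3], c1) := by
        simp only [selStep, g2]; rw [if_neg (by omega), if_neg (by omega)]; norm_num
      have hbest : max (max c0 c1) c2 = c1 := by simp only [max_def]; split_ifs <;> omega
      rw [e2, hbest]
      norm_num [List.filter_cons, beq_iff_eq, show c0 ≠ c1 by omega, show c2 = c1 by omega]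
    · have e2 : selStep [c0, c1, c2] ([2], c1) 2 = ([2], c1) := by
        simp only [selStep, g2]; rw [if_pos (by omega)]
      have hbest : max (max c0 c1) c2 = c1 := by simp only [max_def]; split_ifs <;> omega
      rw [e2, hbest]
      norm_num [List.filter_cons, beq_iff_eq, show c0 ≠ c1 by omega, show c2 ≠ c1 by omega]
  · have e1 : selStep [c0, c1, c2] ([1], c0) 1 = ([1, 2], c0) := by
      simp only [selStep, g1]; rw [if_neg (by omega), if_neg (by omega)]; norm_num
    rw [e1]
    rcases lt_trichotomy c0 c2 with h12 | h12 | h12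
    · have e2 : selStep [c0, c1, c2] ([1, 2], c0) 2 = ([3], c2) := by
        simp only [selStep, g2]; rw [if_neg (by omega), if_pos h12]; norm_num
      have hbest : max (max c0 c1) c2 = c2 := by simp only [max_def]; split_ifs <;> omega
      rw [e2, hbest]
      norm_num [List.filter_cons, beq_iff_eq, show c0 ≠ c2 by omega, show c1 ≠ c2 by omega]
    · have e2 : selStep [c0, c1, c2] ([1, 2], c0) 2 = ([1, 2, 3], c0) := by
        simp only [selStep, g2]; rw [if_neg (by omega), if_neg (by omega)]; norm_num
      have hbest : max (max c0 c1) c2 = c0 := by simp only [max_def]; split_ifs <;> omega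
      rw [e2, hbest]
      norm_num [List.filter_cons, beq_iff_eq, show c1 = c0 by omega, show c2 = c0 by omega]
    · have e2 : selStep [c0, c1, c2] ([1, 2], c0) 2 = ([1, 2], c0) := by
        simp only [selStep, g2]; rw [if_pos (by omega)]
      have hbest : max (max c0 c1) c2 = c0 := by simp only [max_def]; split_ifs <;> omega
      rw [e2, hbest]
      norm_num [List.filter_cons, beq_iff_eq, show c1 = c0 by omega, show c2 ≠ c0 by omega]
  · have e1 : selStep [c0, c1, c2] ([1], c0) 1 = ([1], c0) := by
      simp only [selStep, g1]; rw [if_pos (by omega)]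
    rw [e1]
    rcases lt_trichotomy c0 c2 with h12 | h12 | h12
    · have e2 : selStep [c0, c1, c2] ([1], c0) 2 = ([3], c2) := by
        simp only [selStep, g2]; rw [if_neg (by omega), if_pos h12]; norm_num
      have hbest : max (max c0 c1) c2 = c2 := by simp only [max_def]; split_ifs <;> omega
      rw [e2, hbest]
      norm_num [List.filter_cons, beq_iff_eq, show c0 ≠ c2 by omega, show c1 ≠ c2 by omega]
    · have e2 : selStep [c0, c1, c2] ([1], c0) 2 = ([1, 3], c0) := by
        simp only [selStep, g2]; rw [if_neg (by omega), if_neg (by omega)]; norm_num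
      have hbest : max (max c0 c1) c2 = c0 := by simp only [max_def]; split_ifs <;> omega
      rw [e2, hbest]
      norm_num [List.filter_cons, beq_iff_eq, show c1 ≠ c0 by omega, show c2 = c0 by omega]
    · have e2 : selStep [c0, c1, c2] ([1], c0) 2 = ([1], c0) := by
        simp only [selStep, g2]; rw [if_pos (by omega)]
      have hbest : max (max c0 c1) c2 = c0 := by simp only [max_def]; split_ifs <;> omega
      rw [e2, hbest]
      norm_num [List.filter_cons, beq_iff_eq, show c1 ≠ c0 by omega, show c2 ≠ c0 by omega]

theorem solution_eq_alt (answers : List Int) : solution answers = solution_alt answers := by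
  have hn0 : (0 : Int) ≤ (answers.length : Int) := by positivity
  have hc1 := cyclike_if [1, 2, 3, 4, 5] (by norm_num) (answers.length : Int) hn0
  have hc2 := cyclike_if [2, 1, 2, 3, 2, 4, 2, 5] (by norm_num) (answers.length : Int) hn0
  have hc3 := cyclike_if [3, 3, 1, 1, 2, 2, 4, 4, 5, 5] (by norm_num) (answers.length : Int) hn0
  simp only [solution, solution_alt, List.map_cons, List.map_nil]
  rw [counts_fold]
  dsimp only
  rw [count_eq_score _ _ _ hc1, count_eq_score _ _ _ hc2, count_eq_score _ _ _ hc3]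
  rw [bScore_eq_pyScore answers [1, 2, 3, 4, 5] (by norm_num) (by norm_num),
      bScore_eq_pyScore answers [2, 1, 2, 3, 2, 4, 2, 5] (by norm_num) (by norm_num),
      bScore_eq_pyScore answers [3, 3, 1, 1, 2, 2, 4, 4, 5, 5] (by norm_num) (by norm_num)]
  exact select_eq _ _ _ (score_nonneg _ _) (score_nonneg _ _) (score_nonneg _ _)

-- ===== VERDICT (by name: the statement is the Claim_ definition above) =====
theorem solution_spec : Claim_equal_solution := by
  intro answers _
  exact solution_eq_alt answers
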